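-- pv_equiv track=rewrite | github.com/AMGrobelnik/automating-research-with-agentic-llms | light-pipeline/truncate_json.py | truncate_examples_by_dataset
-- ===== SOURCE A (Python) =====
-- def truncate_examples_by_dataset(examples, max_per_dataset=3):
--     """Truncate examples list to max N examples per dataset type."""
--     if not isinstance(examples, list):
--         return examples
--
--     # Group examples by dataset
--     dataset_groups = {}
--     for example in examples:
--         if isinstance(example, dict) and 'dataset' in example:
--             dataset = example['dataset']
--             if dataset not in dataset_groups:
--                 dataset_groups[dataset] = []
--             dataset_groups[dataset].append(example)
--         else:
--             # If no dataset field, treat as special 'unknown' dataset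
--             if 'unknown' not in dataset_groups:
--                 dataset_groups['unknown'] = []
--             dataset_groups['unknown'].append(example)
--
--     # Build truncated list with max N examples per dataset
--     truncated = []
--
--     for dataset, dataset_examples in sorted(dataset_groups.items()):
--         if len(dataset_examples) > max_per_dataset:
--             truncated.extend(dataset_examples[:max_per_dataset])
--         else:
--             truncated.extend(dataset_examples)
--
--     return truncated
-- ===== SOURCE B (Python) =====
-- def truncate_examples_by_dataset(examples, max_per_dataset=3):
--     """Truncate examples list to max N examples per dataset type.
--
--     Sort-then-group: stably sort by dataset key, then slice each
--     consecutive run of equal keys, instead of building a dict of lists.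
--     """
--     if not isinstance(examples, list):
--         return examples
--
--     def key(e):
--         return e['dataset'] if isinstance(e, dict) and 'dataset' in e else 'unknown'
--
--     out = []
--     run = []
--     for e in sorted(examples, key=key):
--         if run and key(e) != key(run[0]):
--             out.extend(run[:max_per_dataset])
--             run = []
--         run.append(e)
--     out.extend(run[:max_per_dataset])
--     return out
-- ===== Notes on version B (the rewrite author's own statement) =====
-- stated objective: alternative
-- what changed: Replaces the dict-of-lists grouping plus sort over distinct keys with a stable sort of the whole list by dataset key followed by a single pass that slices each consecutive run of equal keys.
import Mathlib
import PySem

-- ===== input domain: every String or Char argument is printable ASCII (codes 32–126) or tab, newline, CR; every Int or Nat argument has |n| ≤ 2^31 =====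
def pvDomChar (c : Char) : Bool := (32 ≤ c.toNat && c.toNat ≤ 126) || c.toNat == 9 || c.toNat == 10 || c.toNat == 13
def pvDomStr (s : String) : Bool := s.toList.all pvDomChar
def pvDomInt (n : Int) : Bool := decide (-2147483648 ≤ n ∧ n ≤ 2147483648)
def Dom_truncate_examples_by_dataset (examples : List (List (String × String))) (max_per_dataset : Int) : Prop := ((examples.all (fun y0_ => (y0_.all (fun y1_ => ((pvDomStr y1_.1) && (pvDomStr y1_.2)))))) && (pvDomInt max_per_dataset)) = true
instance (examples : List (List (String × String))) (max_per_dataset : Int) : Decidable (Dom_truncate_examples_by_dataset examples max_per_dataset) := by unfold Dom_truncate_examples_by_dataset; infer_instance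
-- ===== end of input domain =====

-- B replaces A's dict-of-lists grouping (then sort of the distinct keys) by a stable sort of the
-- whole list on the dataset key followed by one pass that slices each consecutive equal-key run
-- (objective: alternative decomposition, same result).

-- ===== PORT A =====
-- shared key helper: e['dataset'] if 'dataset' in e else 'unknown' (first-match lookup on the assoc list)
def exKey (e : List (String × String)) : String :=
  match e.find? (fun p => p.1 == "dataset") with
  | some p => p.2
  | none => "unknown"

def truncate_examples_by_dataset (examples : List (List (String × String))) (max_per_dataset : Int) : List (List (String × String)) :=
  -- dataset_groups = {}; for example in examples: if key missing insert []; append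
  let dataset_groups : PySem.Dict String (List (List (String × String))) :=
    examples.foldl (fun g ex =>
      let g1 := if g.contains (exKey ex) then g else g.insert (exKey ex) []
      g1.modify (exKey ex) [] (fun l => l ++ [ex]))
      PySem.Dict.empty
  -- sorted(dataset_groups.items()): dict keys are distinct, so Python's pair comparison is
  -- decided by the first component alone; ported as a (stable) sort keyed on the first component
  (PySem.List.sorted dataset_groups.items (fun p => p.1) false).foldl
    (fun truncated p =>
      if (p.2.length : Int) > max_per_dataset then truncated ++ PySem.List.slice p.2 none (some max_per_dataset)
      else truncated ++ p.2) []

-- ===== PORT B =====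
-- one step of B's loop over the sorted list: flush the run when the key changes
def bstep (max_per_dataset : Int) (st : List (List (String × String)) × List (List (String × String)))
    (e : List (String × String)) : List (List (String × String)) × List (List (String × String)) :=
  match st.2 with
  | [] => (st.1, [e])
  | r0 :: _ =>
    if exKey e ≠ exKey r0 then (st.1 ++ PySem.List.slice st.2 none (some max_per_dataset), [e])
    else (st.1, st.2 ++ [e])

def truncate_examples_by_dataset_alt (examples : List (List (String × String))) (max_per_dataset : Int) : List (List (String × String)) :=
  let st := (PySem.List.sorted examples exKey false).foldl (bstep max_per_dataset) ([], [])
  st.1 ++ PySem.List.slice st.2 none (some max_per_dataset)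

-- ===== PRECONDITION & SPEC =====
def Spec_truncate_examples_by_dataset (examples : List (List (String × String))) (max_per_dataset : Int) (out : List (List (String × String))) : Prop := out = truncate_examples_by_dataset_alt examples max_per_dataset
instance (examples : List (List (String × String))) (max_per_dataset : Int) (out : List (List (String × String))) : Decidable (Spec_truncate_examples_by_dataset examples max_per_dataset out) := by unfold Spec_truncate_examples_by_dataset; infer_instance

-- ===== CLAIM (what is proved, stated in full; the proofs are below) =====
def Claim_equal_truncate_examples_by_dataset : Prop := ∀ (examples : List (List (String × String))) (max_per_dataset : Int), Dom_truncate_examples_by_dataset examples max_per_dataset → Spec_truncate_examples_by_dataset examples max_per_dataset (truncate_examples_by_dataset examples max_per_dataset)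

-- ===== LEMMAS AND PROOFS =====

-- abbreviations used only by the proofs
def exGrp (examples : List (List (String × String))) (c : String) : List (List (String × String)) :=
  examples.filter (fun e => exKey e == c)

def exKeys (examples : List (List (String × String))) : List String :=
  PySem.List.sorted (PySem.Set.ofList (examples.map exKey)) (fun x => x) false

-- the canonical value both ports are proved equal to
def canon (examples : List (List (String × String))) (m : Int) : List (List (String × String)) :=
  (exKeys examples).flatMap (fun c => PySem.List.slice (exGrp examples c) none (some m))

def flush (m : Int) (st : List (List (String × String)) × List (List (String × String))) :
    List (List (String × String)) :=
  st.1 ++ PySem.List.slice st.2 none (some m)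

theorem slice_nil (m : Int) : PySem.List.slice ([] : List (List (String × String))) none (some m) = [] := by
  simp [PySem.List.slice]

theorem fm_congr {α β : Type} (l : List α) (f g : α → List β) (h : ∀ a ∈ l, f a = g a) :
    l.flatMap f = l.flatMap g := by
  induction l with
  | nil => rfl
  | cons a t ih =>
    simp only [List.flatMap_cons, h a (by simp)]
    rw [ih (fun b hb => h b (by simp [hb]))]

-- a slice [:m] of a list of length ≤ m is the list itself, so A's guarded extend is a plain slice
theorem trunc_eq_slice (l : List (List (String × String))) (m : Int) :
    (if (l.length : Int) > m then PySem.List.slice l none (some m) else l) = PySem.List.slice l none (some m) := by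
  split_ifs with h
  · rfl
  · rw [PySem.List.slice_to (xs := l) (b := m) (by omega)]
    exact (List.take_of_length_le (by omega)).symm

-- ---- A side ----

-- the guarded insert-then-append step is Dict.modify
theorem step_eq_modify (g : PySem.Dict String (List (List (String × String)))) (c : String)
    (f : List (List (String × String)) → List (List (String × String))) :
    ((if g.contains c then g else g.insert c []).modify c [] f) = g.modify c [] f := by
  by_cases hc : g.contains c
  · simp [hc]
  · simp only [hc, Bool.false_eq_true, if_false]
    simp only [PySem.Dict.modify, PySem.Dict.insert_insert_self]
    have h1 : (g.insert c []).getD c [] = [] := by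
      simp [PySem.Dict.getD, PySem.Dict.get?_insert_self]
    have h2 : g.getD c [] = [] := by
      simp only [PySem.Dict.getD, PySem.Dict.get?, PySem.Dict.contains] at *
      rw [List.find?_eq_none.2]
      · rfl
      · intro p hp
        simp only [List.any_eq_true] at hc
        push_neg at hc
        exact hc p hp
    rw [h1, h2]

theorem groups_items (examples : List (List (String × String))) :
    (examples.foldl (fun g ex =>
      let g1 := if g.contains (exKey ex) then g else g.insert (exKey ex) []
      g1.modify (exKey ex) [] (fun l => l ++ [ex]))
      PySem.Dict.empty).items
    = (PySem.Set.ofList (examples.map exKey)).map (fun c => (c, exGrp examples c)) := by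
  rw [PySem.List.foldl_congr_mem _ _ (fun g ex => g.modify (exKey ex) [] (fun l => l ++ [ex])) _
    (fun acc x _ => step_eq_modify acc (exKey x) _)]
  rw [← List.foldl_map (f := fun e => ((exKey e, e) : String × List (String × String)))
    (g := fun (d : PySem.Dict String (List (List (String × String)))) p => d.modify p.1 [] (fun l => l ++ [p.2]))]
  have hkeys : ((examples.map (fun e => ((exKey e, e) : String × List (String × String)))).foldl
      (fun d p => d.modify p.1 [] (fun l => l ++ [p.2])) PySem.Dict.empty).keys
      = PySem.Set.ofList (examples.map exKey) := by
    have := PySem.Dict.keys_foldl_modify_key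
      (l := examples.map (fun e => ((exKey e, e) : String × List (String × String))))
      (key := fun p => p.1) (d0 := ([] : List (List (String × String))))
      (f := fun _ p l => l ++ [p.2]) (d := PySem.Dict.empty)
    simp only [List.map_map] at this
    rw [this, PySem.Set.ofList_eq_foldl]
    rfl
  have hnodup : ((examples.map (fun e => ((exKey e, e) : String × List (String × String)))).foldl
      (fun d p => d.modify p.1 [] (fun l => l ++ [p.2])) PySem.Dict.empty).keys.Nodup := by
    exact PySem.Dict.nodup_keys_foldl_modify_key
      (l := examples.map (fun e => ((exKey e, e) : String × List (String × String))))
      (key := fun p => p.1) (d0 := ([] : List (List (String × String))))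
      (f := fun _ p l => l ++ [p.2]) (d := PySem.Dict.empty) List.nodup_nil
  rw [PySem.Dict.items_eq_map_keys _ hnodup []]
  rw [hkeys]
  apply List.map_congr_left
  intro c _
  rw [PySem.Dict.getD_foldl_modify_append]
  simp only [List.filter_map, List.map_map]
  rw [exGrp]
  have : ((fun (x : String × List (String × String)) => x.2) ∘ fun e => ((exKey e, e) : String × List (String × String))) = id := rfl
  simp [this, Function.comp_def]

theorem A_eq_canon (examples : List (List (String × String))) (m : Int) :
    truncate_examples_by_dataset examples m = canon examples m := by
  simp only [truncate_examples_by_dataset]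
  rw [groups_items]
  have hsorted : PySem.List.sorted
      ((PySem.Set.ofList (examples.map exKey)).map (fun c => (c, exGrp examples c)))
      (fun p => p.1) false
      = (exKeys examples).map (fun c => (c, exGrp examples c)) := by
    apply PySem.List.sorted_eq_of_perm_of_pairwise_lt
    · exact (PySem.List.sorted_perm _ _ _).map _
    · rw [List.pairwise_map]
      exact PySem.List.sorted_ofList_pairwise_lt _
  rw [hsorted]
  rw [PySem.List.foldl_congr_mem _ _
    (fun (truncated : List (List (String × String))) p =>
      truncated ++ (if ((p.2 : List (List (String × String))).length : Int) > m
        then PySem.List.slice p.2 none (some m) else p.2)) _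
    (fun acc x _ => by split_ifs with h <;> simp [h])]
  rw [PySem.List.foldl_append_eq_flatMap, List.flatMap_map, List.nil_append]
  unfold canon
  apply fm_congr
  intro c _
  exact trunc_eq_slice (exGrp examples c) m

-- ---- B side ----

theorem insertBy_all_before {α : Type} (before : α → α → Bool) (x : α) (l : List α)
    (h : ∀ a ∈ l, before x a = true) : PySem.List.insertBy before x l = x :: l := by
  cases l with
  | nil => rfl
  | cons a t => simp [PySem.List.insertBy, h a (by simp)]

theorem insertBy_append_left {α : Type} (before : α → α → Bool) (x : α) (l m : List α)
    (h : ∀ a ∈ l, before x a = false) :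
    PySem.List.insertBy before x (l ++ m) = l ++ PySem.List.insertBy before x m := by
  induction l with
  | nil => rfl
  | cons a t ih =>
    simp only [List.cons_append, PySem.List.insertBy, h a (by simp)]
    simp only [Bool.false_eq_true, if_false, List.cons.injEq, true_and]
    exact ih (fun b hb => h b (by simp [hb]))

theorem ins_flat (x : List (String × String)) (L : List String)
    (hL : L.Pairwise (· < ·))
    (g : String → List (List (String × String)))
    (hg : ∀ c ∈ L, ∀ e ∈ g c, exKey e = c)
    (hk : exKey x ∉ L → g (exKey x) = []) :
    PySem.List.insertBy (fun a b => decide (exKey a < exKey b)) x (L.flatMap g)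
      = (if exKey x ∈ L then L else PySem.List.insertBy (fun a b => decide (a < b)) (exKey x) L).flatMap
          (fun c => g c ++ if exKey x == c then [x] else []) := by
  induction L with
  | nil =>
    simp [PySem.List.insertBy, hk List.not_mem_nil]
  | cons c L' ih =>
    have hcl : ∀ d ∈ L', c < d := (List.pairwise_cons.1 hL).1
    have hL' : L'.Pairwise (· < ·) := (List.pairwise_cons.1 hL).2
    rcases lt_trichotomy (exKey x) c with hlt | heq | hgt
    · have hnot : exKey x ∉ c :: L' := by
        intro hmem
        rcases List.mem_cons.1 hmem with h | h
        · exact absurd h (ne_of_lt hlt)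
        · exact absurd (hlt.trans (hcl _ h)) (lt_irrefl _)
      rw [if_neg hnot]
      rw [insertBy_all_before _ _ _ (by
        intro e he
        rcases List.mem_flatMap.1 he with ⟨d, hd, hed⟩
        have he' : exKey e = d := hg d hd e hed
        rcases List.mem_cons.1 hd with h | h
        · simp [he', h, hlt]
        · simp [he', hlt.trans (hcl _ h)])]
      rw [insertBy_all_before _ _ _ (by
        intro d hd
        rcases List.mem_cons.1 hd with h | h
        · simp [h, hlt]
        · simp [hlt.trans (hcl _ h)])]
      have h2 : L'.flatMap (fun d => g d ++ if exKey x = d then [x] else []) = L'.flatMap g := by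
        apply fm_congr
        intro d hd
        have : exKey x ≠ d := ne_of_lt (hlt.trans (hcl _ hd))
        simp [this]
      simp [List.flatMap_cons, hk hnot, h2, ne_of_lt hlt]
    · have hmem : exKey x ∈ c :: L' := by rw [heq]; exact List.mem_cons_self
      rw [if_pos hmem]
      rw [List.flatMap_cons]
      rw [insertBy_append_left _ _ _ _ (by
        intro e he
        have : exKey e = c := hg c List.mem_cons_self e he
        simp [this, heq])]
      rw [insertBy_all_before _ _ _ (by
        intro e he
        rcases List.mem_flatMap.1 he with ⟨d, hd, hed⟩
        have he' : exKey e = d := hg d (List.mem_cons_of_mem _ hd) e hed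
        simp [he', heq ▸ hcl _ hd])]
      have h2 : L'.flatMap (fun d => g d ++ if c = d then [x] else []) = L'.flatMap g := by
        apply fm_congr
        intro d hd
        simp [ne_of_lt (hcl _ hd)]
      simp [List.flatMap_cons, heq, h2]
    · have hkne : exKey x ≠ c := ne_of_gt hgt
      have hk' : exKey x ∉ L' → g (exKey x) = [] := by
        intro h
        exact hk (by simp [hkne, h])
      rw [List.flatMap_cons]
      rw [insertBy_append_left _ _ _ _ (by
        intro e he
        have : exKey e = c := hg c List.mem_cons_self e he
        simp [this, not_lt.2 (le_of_lt hgt)])]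
      rw [ih hL' (fun d hd e he => hg d (List.mem_cons_of_mem _ hd) e he) hk']
      by_cases hm : exKey x ∈ L'
      · rw [if_pos hm, if_pos (List.mem_cons_of_mem _ hm)]
        simp [List.flatMap_cons, hkne]
      · rw [if_neg hm, if_neg (by simp [hkne, hm])]
        have hins : PySem.List.insertBy (fun a b => decide (a < b)) (exKey x) (c :: L')
            = c :: PySem.List.insertBy (fun a b => decide (a < b)) (exKey x) L' := by
          simp [PySem.List.insertBy, not_lt.2 (le_of_lt hgt)]
        rw [hins]
        simp [List.flatMap_cons, hkne]

theorem sorted_snoc {α κ : Type} [LT κ] [DecidableLT κ] (xs : List α) (x : α) (key : α → κ) :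
    PySem.List.sorted (xs ++ [x]) key false
      = PySem.List.insertBy (fun a b => decide (key a < key b)) x (PySem.List.sorted xs key false) := by
  rw [PySem.List.sorted_eq_foldl_insertBy, PySem.List.sorted_eq_foldl_insertBy, List.foldl_append]
  rfl

theorem exKeys_pairwise (examples : List (List (String × String))) : (exKeys examples).Pairwise (· < ·) :=
  PySem.List.sorted_ofList_pairwise_lt _

theorem exGrp_keys (examples : List (List (String × String))) :
    ∀ c ∈ exKeys examples, ∀ e ∈ exGrp examples c, exKey e = c := by
  intro c _ e he
  simpa using (List.mem_filter.1 he).2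

theorem sorted_eq_flatMap (examples : List (List (String × String))) :
    PySem.List.sorted examples exKey false = (exKeys examples).flatMap (exGrp examples) := by
  induction examples using List.reverseRecOn with
  | nil => rfl
  | append_singleton xs x ih =>
    rw [sorted_snoc, ih]
    have hset : PySem.Set.ofList ((xs ++ [x]).map exKey)
        = PySem.Set.add (PySem.Set.ofList (xs.map exKey)) (exKey x) := by
      rw [List.map_append, PySem.Set.ofList_eq_foldl, PySem.Set.ofList_eq_foldl, List.foldl_append]
      rfl
    have hk : exKey x ∉ exKeys xs → exGrp xs (exKey x) = [] := by
      intro h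
      rw [exGrp]
      apply List.filter_eq_nil_iff.2
      intro e he hbe
      apply h
      rw [exKeys, PySem.List.mem_sorted]
      have hm : exKey e ∈ xs.map exKey := List.mem_map_of_mem he
      rw [eq_of_beq hbe] at hm
      exact (PySem.Set.mem_ofList _ _).2 hm
    rw [ins_flat x (exKeys xs) (exKeys_pairwise xs) (exGrp xs) (exGrp_keys xs) hk]
    have hgrp : ∀ c, exGrp (xs ++ [x]) c = exGrp xs c ++ (if exKey x == c then [x] else []) := by
      intro c
      rw [exGrp, exGrp, List.filter_append]
      congr 1
      by_cases h : exKey x = c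
      · simp [List.filter, h]
      · have hb : (exKey x == c) = false := beq_eq_false_iff_ne.2 h
        simp [List.filter, hb]
    have hmemset : exKey x ∈ exKeys xs ↔ exKey x ∈ PySem.Set.ofList (xs.map exKey) := by
      rw [exKeys, PySem.List.mem_sorted]
    by_cases hm : exKey x ∈ exKeys xs
    · rw [if_pos hm]
      have hkeys : exKeys (xs ++ [x]) = exKeys xs := by
        rw [exKeys, exKeys, hset, PySem.Set.add,
          if_pos (by simpa [PySem.Set.contains] using hmemset.1 hm)]
      rw [hkeys]
      exact fm_congr _ _ _ (fun c _ => (hgrp c).symm)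
    · rw [if_neg hm]
      have hkeys : exKeys (xs ++ [x])
          = PySem.List.insertBy (fun a b => decide (a < b)) (exKey x) (exKeys xs) := by
        rw [exKeys, hset, PySem.Set.add,
          if_neg (by simpa [PySem.Set.contains] using fun hc => hm (hmemset.2 hc)), sorted_snoc]
        rfl
      rw [hkeys]
      exact fm_congr _ _ _ (fun c _ => (hgrp c).symm)

theorem bstep_run (m : Int) (l : List (List (String × String))) (out : List (List (String × String)))
    (r0 : List (String × String)) (rs : List (List (String × String)))
    (h : ∀ e ∈ l, exKey e = exKey r0) :
    l.foldl (bstep m) (out, r0 :: rs) = (out, r0 :: (rs ++ l)) := by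
  induction l generalizing rs with
  | nil => simp
  | cons e t ih =>
    rw [List.foldl_cons]
    have hstep : bstep m (out, r0 :: rs) e = (out, r0 :: (rs ++ [e])) := by
      simp [bstep, h e List.mem_cons_self]
    rw [hstep, ih (rs ++ [e]) (fun e' he' => h e' (List.mem_cons_of_mem _ he'))]
    simp

theorem bstep_groups (m : Int) (g : String → List (List (String × String))) :
    ∀ (L : List String), L.Pairwise (· < ·) →
    (∀ c ∈ L, ∀ e ∈ g c, exKey e = c) →
    ∀ (out : List (List (String × String))) (r0 : List (String × String)) (rs : List (List (String × String))),
    exKey r0 ∉ L →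
    flush m ((L.flatMap g).foldl (bstep m) (out, r0 :: rs))
    = out ++ PySem.List.slice (r0 :: rs) none (some m)
        ++ L.flatMap (fun c => PySem.List.slice (g c) none (some m)) := by
  intro L
  induction L with
  | nil => intro _ _ out r0 rs _; simp [flush]
  | cons c L' ih =>
    intro hL hg out r0 rs hr
    have hcl : ∀ d ∈ L', c < d := (List.pairwise_cons.1 hL).1
    have hL' : L'.Pairwise (· < ·) := (List.pairwise_cons.1 hL).2
    have hg' : ∀ d ∈ L', ∀ e ∈ g d, exKey e = d := fun d hd e he => hg d (List.mem_cons_of_mem _ hd) e he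
    have hrc : exKey r0 ≠ c := fun h => hr (h ▸ List.mem_cons_self)
    have hrL' : exKey r0 ∉ L' := fun h => hr (List.mem_cons_of_mem _ h)
    cases hgc : g c with
    | nil =>
      rw [List.flatMap_cons, hgc, List.nil_append, ih hL' hg' out r0 rs hrL', List.flatMap_cons, hgc,
        slice_nil]
      simp
    | cons e0 es =>
      have he0 : exKey e0 = c := hg c List.mem_cons_self e0 (hgc ▸ List.mem_cons_self)
      rw [List.flatMap_cons, hgc, List.foldl_append, List.foldl_cons]
      have hstep : bstep m (out, r0 :: rs) e0
          = (out ++ PySem.List.slice (r0 :: rs) none (some m), [e0]) := by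
        simp only [bstep]
        rw [if_pos (by rw [he0]; exact fun h => hrc h.symm)]
      rw [hstep]
      rw [bstep_run m es _ e0 [] (fun e he =>
        (hg c List.mem_cons_self e (hgc ▸ List.mem_cons_of_mem _ he)).trans he0.symm)]
      rw [List.nil_append]
      have hc' : exKey e0 ∉ L' := by rw [he0]; exact fun h => absurd (hcl _ h) (lt_irrefl _)
      rw [ih hL' hg' _ e0 es hc', List.flatMap_cons, hgc]
      simp

theorem bstep_groups_nil (m : Int) (g : String → List (List (String × String)))
    (L : List String) (hL : L.Pairwise (· < ·))
    (hg : ∀ c ∈ L, ∀ e ∈ g c, exKey e = c) (out : List (List (String × String))) :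
    flush m ((L.flatMap g).foldl (bstep m) (out, []))
    = out ++ L.flatMap (fun c => PySem.List.slice (g c) none (some m)) := by
  cases L with
  | nil => simp [flush, slice_nil]
  | cons c L' =>
    have hcl : ∀ d ∈ L', c < d := (List.pairwise_cons.1 hL).1
    have hL' : L'.Pairwise (· < ·) := (List.pairwise_cons.1 hL).2
    have hg' : ∀ d ∈ L', ∀ e ∈ g d, exKey e = d := fun d hd e he => hg d (List.mem_cons_of_mem _ hd) e he
    cases hgc : g c with
    | nil =>
      rw [List.flatMap_cons, hgc, List.nil_append, List.flatMap_cons, hgc, slice_nil, List.nil_append]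
      exact bstep_groups_nil m g L' hL' hg' out
    | cons e0 es =>
      have he0 : exKey e0 = c := hg c List.mem_cons_self e0 (hgc ▸ List.mem_cons_self)
      rw [List.flatMap_cons, hgc, List.foldl_append, List.foldl_cons]
      have hstep : bstep m (out, []) e0 = (out, [e0]) := by simp [bstep]
      rw [hstep]
      rw [bstep_run m es _ e0 [] (fun e he =>
        (hg c List.mem_cons_self e (hgc ▸ List.mem_cons_of_mem _ he)).trans he0.symm)]
      rw [List.nil_append]
      have hc' : exKey e0 ∉ L' := by rw [he0]; exact fun h => absurd (hcl _ h) (lt_irrefl _)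
      rw [bstep_groups m g L' hL' hg' out e0 es hc', List.flatMap_cons, hgc]
      simp

theorem B_eq_canon (examples : List (List (String × String))) (m : Int) :
    truncate_examples_by_dataset_alt examples m = canon examples m := by
  show flush m ((PySem.List.sorted examples exKey false).foldl (bstep m) ([], [])) = canon examples m
  rw [sorted_eq_flatMap]
  rw [bstep_groups_nil m (exGrp examples) (exKeys examples) (exKeys_pairwise examples)
    (exGrp_keys examples) []]
  rw [List.nil_append]
  rfl

-- ===== VERDICT (by name: the statement is the Claim_ definition above) =====
theorem truncate_examples_by_dataset_spec : Claim_equal_truncate_examples_by_dataset := by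
  intro examples m _
  unfold Spec_truncate_examples_by_dataset
  rw [A_eq_canon, B_eq_canon]
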